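-- pv_equiv track=rewrite | github.com/MateoKrile/Elements-of-AI---Building-AI | Section 2 Probability/Flip the coin.py | count
-- ===== SOURCE A (Python) =====
-- def count(seq):
--     i = 0
--     cnt = 0
--     while i<len(seq)-1:
--         if seq[i] and i+4<len(seq):
--             ones = 1
--             for j in range(1, 5):
--                 if seq[i+j]:
--                     ones += 1
--             if ones==5:
--                 cnt += 1
--         i+=1
--     return cnt
-- ===== SOURCE B (Python) =====
-- def count(seq):
--     cnt = 0
--     streak = 0
--     for x in seq:
--         if x:
--             streak += 1
--             if streak >= 5:
--                 cnt += 1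
--         else:
--             streak = 0
--     return cnt
-- ===== Notes on version B (the rewrite author's own statement) =====
-- stated objective: simpler
-- what changed: Replaces the index-based outer while loop with a 5-iteration inner recount per position by a single forward pass that maintains a running streak of consecutive truthy elements, counting whenever the streak reaches 5.
import Mathlib
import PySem

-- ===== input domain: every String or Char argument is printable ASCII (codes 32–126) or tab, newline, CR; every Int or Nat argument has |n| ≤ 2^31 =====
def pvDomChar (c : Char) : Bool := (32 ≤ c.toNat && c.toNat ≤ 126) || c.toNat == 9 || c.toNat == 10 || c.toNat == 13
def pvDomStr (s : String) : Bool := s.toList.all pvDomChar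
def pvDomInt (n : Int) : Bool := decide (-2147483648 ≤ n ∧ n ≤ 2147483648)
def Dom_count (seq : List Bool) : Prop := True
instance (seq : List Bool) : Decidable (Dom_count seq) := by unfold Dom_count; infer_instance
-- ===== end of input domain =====

-- B replaces A's per-position inner recount of 5 elements by a single pass keeping a
-- running streak of consecutive truthy elements (objective: simpler).

-- ===== PORT A =====
-- A's while loop over index i (always 0 ≤ i, so i is kept as a Nat index; seq[i] with
-- 0 ≤ i < len is exactly seq.getD i false); the while loop is a fuel recursion with
-- fuel = seq.length, enough for every iteration the loop makes. The inner
-- 'for j in range(1, 5)' is a fold over PySem.List.pyRange 1 5 1.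
def count_go (seq : List Bool) (fuel : Nat) (i : Nat) (cnt : Int) : Int :=
  match fuel with
  | 0 => cnt
  | fuel + 1 =>
    if i < seq.length - 1 then
      let cnt' :=
        if seq.getD i false ∧ (i : Int) + 4 < (seq.length : Int) then
          let ones : Int := (PySem.List.pyRange 1 5 1).foldl
            (fun ones j => if seq.getD (i + j.toNat) false then ones + 1 else ones) 1
          if ones = 5 then cnt + 1 else cnt
        else cnt
      count_go seq fuel (i + 1) cnt'
    else cnt

def count (seq : List Bool) : Int := count_go seq seq.length 0 0

-- ===== PORT B =====
-- single pass: state (streak, cnt); one step of the loop body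
def stepB (st : Int × Int) (x : Bool) : Int × Int :=
  if x then (st.1 + 1, if st.1 + 1 ≥ 5 then st.2 + 1 else st.2) else (0, st.2)

def count_alt (seq : List Bool) : Int :=
  (seq.foldl stepB ((0 : Int), (0 : Int))).2

-- ===== PRECONDITION & SPEC =====
def Spec_count (seq : List Bool) (out : Int) : Prop := out = count_alt seq
instance (seq : List Bool) (out : Int) : Decidable (Spec_count seq out) := by unfold Spec_count; infer_instance

-- ===== CLAIM (what is proved, stated in full; the proofs are below) =====
def Claim_equal_count : Prop := ∀ (seq : List Bool), Dom_count seq → Spec_count seq (count seq)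

-- ===== LEMMAS AND PROOFS =====

-- number of windows of 5 consecutive true values, counted by starting position
def win5 (l : List Bool) : Bool :=
  l.getD 0 false && l.getD 1 false && l.getD 2 false && l.getD 3 false && l.getD 4 false
    && decide (5 ≤ l.length)

def W : List Bool → Int
  | [] => 0
  | x :: xs => (if win5 (x :: xs) then 1 else 0) + W xs

theorem W_short {l : List Bool} (h : l.length ≤ 4) : W l = 0 := by
  induction l with
  | nil => simp [W]
  | cons x xs ih =>
    simp only [List.length_cons] at h
    have hx : xs.length ≤ 4 := by omega
    have : win5 (x :: xs) = false := by
      simp only [win5, List.length_cons, decide_eq_false_iff_not]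
      simp only [Bool.and_eq_false_iff]
      right; simp; omega
    simp [W, this, ih hx]

theorem getD_drop (l : List Bool) (i j : Nat) :
    (l.drop i).getD j false = l.getD (i + j) false := by
  simp [List.getD_eq_getElem?_getD, List.getElem?_drop]

-- ones = 5 iff the four inspected elements are all true
theorem ones_iff (b1 b2 b3 b4 : Bool) :
    (List.foldl (fun o b => if b = true then o + 1 else o) (1 : Int) [b1, b2, b3, b4] = 5)
      ↔ (b1 && (b2 && (b3 && b4))) = true := by
  revert b1 b2 b3 b4; decide

-- A-side: the loop from index i adds the number of windows starting at positions ≥ i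
theorem count_go_eq (seq : List Bool) (fuel i : Nat) (cnt : Int)
    (hfuel : seq.length - 1 ≤ i + fuel) :
    count_go seq fuel i cnt = cnt + W (seq.drop i) := by
  induction fuel generalizing i cnt with
  | zero =>
    have hlen : (seq.drop i).length ≤ 4 := by simp; omega
    rw [count_go, W_short hlen]; ring
  | succ fuel ih =>
    rw [count_go]
    by_cases h : i < seq.length - 1
    · have hi : i < seq.length := by omega
      have hdrop : seq.drop i = seq.getD i false :: seq.drop (i + 1) := by
        rw [List.getD_eq_getElem?_getD, List.getElem?_eq_getElem hi]
        simpa using (List.getElem_cons_drop hi).symm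
      have hrange : PySem.List.pyRange 1 5 1 = [1, 2, 3, 4] := by decide
      simp only [if_pos h, hrange]
      rw [ih (i + 1) _ (by omega), hdrop, W, ← hdrop]
      have hones : (([1, 2, 3, 4] : List Int).foldl
            (fun ones j => if seq.getD (i + j.toNat) false then ones + 1 else ones) 1)
          = List.foldl (fun o b => if b = true then o + 1 else o) (1 : Int)
              [seq.getD (i+1) false, seq.getD (i+2) false,
               seq.getD (i+3) false, seq.getD (i+4) false] := rfl
      have hwin : win5 (seq.drop i) =
          (seq.getD i false && seq.getD (i+1) false && seq.getD (i+2) false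
            && seq.getD (i+3) false && seq.getD (i+4) false
            && decide (i + 4 < seq.length)) := by
        simp only [win5, getD_drop, List.length_drop, Nat.add_zero]
        congr 1
        exact decide_eq_decide.mpr (by omega)
      rw [hones, hwin]
      by_cases hb0 : seq.getD i false = true
      · by_cases h5 : i + 4 < seq.length
        · have h5I : ((i : Int) + 4 < (seq.length : Int)) := by omega
          rw [if_pos ⟨hb0, h5I⟩]
          by_cases hall : (seq.getD (i+1) false && (seq.getD (i+2) false
              && (seq.getD (i+3) false && seq.getD (i+4) false))) = true
          · rw [if_pos ((ones_iff _ _ _ _).mpr hall)]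
            simp only [Bool.and_eq_true] at hall
            obtain ⟨e1, e2, e3, e4⟩ := hall
            have hC : (seq.getD i false && seq.getD (i+1) false && seq.getD (i+2) false
                && seq.getD (i+3) false && seq.getD (i+4) false
                && decide (i + 4 < seq.length)) = true := by
              simp only [hb0, e1, e2, e3, e4, Bool.true_and]
              exact decide_eq_true h5
            rw [hC]; simp; try ring
          · rw [if_neg (fun hc => hall ((ones_iff _ _ _ _).mp hc))]
            have hf : (seq.getD (i+1) false && (seq.getD (i+2) false
                && (seq.getD (i+3) false && seq.getD (i+4) false))) = false := by
              simpa using hall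
            have hC : (seq.getD i false && seq.getD (i+1) false && seq.getD (i+2) false
                && seq.getD (i+3) false && seq.getD (i+4) false
                && decide (i + 4 < seq.length)) = false := by
              rcases Bool.and_eq_false_iff.mp hf with e | hf2
              · simp only [e, Bool.and_false, Bool.false_and]
              rcases Bool.and_eq_false_iff.mp hf2 with e | hf3
              · simp only [e, Bool.and_false, Bool.false_and]
              rcases Bool.and_eq_false_iff.mp hf3 with e | e
              · simp only [e, Bool.and_false, Bool.false_and]
              · simp only [e, Bool.and_false, Bool.false_and]
            rw [hC]; simp; try ring
        · have h5I : ¬ ((i : Int) + 4 < (seq.length : Int)) := by omega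
          rw [if_neg (fun hc => h5I hc.2)]
          have hd : decide (i + 4 < seq.length) = false := by simpa using h5
          have hC : (seq.getD i false && seq.getD (i+1) false && seq.getD (i+2) false
                && seq.getD (i+3) false && seq.getD (i+4) false
                && decide (i + 4 < seq.length)) = false := by
            simp only [hd, Bool.and_false]
          rw [hC]; simp; try ring
      · rw [if_neg (fun hc => hb0 hc.1)]
        have hb0' : seq.getD i false = false := by simpa using hb0
        have hC : (seq.getD i false && seq.getD (i+1) false && seq.getD (i+2) false
                && seq.getD (i+3) false && seq.getD (i+4) false
                && decide (i + 4 < seq.length)) = false := by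
          simp only [hb0', Bool.and_false, Bool.false_and]
        rw [hC]; simp; try ring
    · rw [if_neg h]
      have hlen : (seq.drop i).length ≤ 4 := by simp; omega
      rw [W_short hlen]; ring

-- B-side: residual count as a function of current streak
def g : Nat → List Bool → Int
  | _, [] => 0
  | s, true :: xs => (if s + 1 ≥ 5 then 1 else 0) + g (s + 1) xs
  | _, false :: xs => g 0 xs

theorem foldl_eq_g (l : List Bool) (s : Nat) (c : Int) :
    (l.foldl stepB ((s : Int), c)).2 = c + g s l := by
  induction l generalizing s c with
  | nil => simp [g]
  | cons x xs ih =>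
    cases x
    · have e : stepB ((s : Int), c) false = (((0 : Nat) : Int), c) := by simp [stepB]
      rw [List.foldl_cons, e, ih]
      simp [g]
    · have h5 : ((s : Int) + 1 ≥ 5) ↔ (s + 1 ≥ 5) := by omega
      have e : stepB ((s : Int), c) true
          = (((s + 1 : Nat) : Int), if s + 1 ≥ 5 then c + 1 else c) := by
        simp [stepB, Prod.ext_iff, h5]
      rw [List.foldl_cons, e, ih]
      by_cases h : s + 1 ≥ 5 <;> simp [g, h] <;> ring

-- streaks of length ≥ 4 behave identically
theorem g_cap (l : List Bool) (s t : Nat) (hs : 4 ≤ s) (ht : 4 ≤ t) :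
    g s l = g t l := by
  induction l generalizing s t with
  | nil => rfl
  | cons x xs ih =>
    cases x
    · simp [g]
    · rw [g, g, ih (s + 1) (t + 1) (by omega) (by omega),
        if_pos (by omega : s + 1 ≥ 5), if_pos (by omega : t + 1 ≥ 5)]

theorem g_eq_W (l : List Bool) (s : Nat) (hs : s ≤ 4) :
    g s l = W (List.replicate s true ++ l) := by
  induction l generalizing s with
  | nil =>
    have : (List.replicate s true ++ ([] : List Bool)).length ≤ 4 := by simp [hs]
    rw [W_short this]; rfl
  | cons x xs ih =>
    cases x
    · -- a false element breaks every window through the true prefix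
      have hW : W (List.replicate s true ++ false :: xs) = W xs := by
        interval_cases s <;> simp [List.replicate, W, win5, List.getD]
      rw [g, hW]
      simpa using ih 0 (by omega)
    · have hshift : List.replicate s true ++ true :: xs
          = List.replicate (s + 1) true ++ xs := by
        simp [List.replicate_succ']
      rw [g, hshift]
      by_cases h : s = 4
      · subst h
        rw [if_pos (by omega : 4 + 1 ≥ 5), g_cap xs 5 4 (by omega) (by omega),
          ih 4 (by omega)]
        have hw : W (List.replicate 5 true ++ xs)
            = 1 + W (List.replicate 4 true ++ xs) := by
          have hwin : win5 (true :: true :: true :: true :: true :: xs) = true := by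
            simp [win5, List.getD]
          simp only [List.replicate, List.cons_append, List.nil_append, W]
          rw [hwin]; simp
        rw [hw]
      · rw [if_neg (by omega : ¬ s + 1 ≥ 5), ih (s + 1) (by omega)]
        simp

-- ===== VERDICT (by name: the statement is the Claim_ definition above) =====
theorem count_spec : Claim_equal_count := by
  intro seq _
  unfold Spec_count count count_alt
  have hB := foldl_eq_g seq 0 0
  norm_num at hB
  rw [hB, count_go_eq seq seq.length 0 0 (by omega)]
  have hg := g_eq_W seq 0 (by omega)
  simp at hg ⊢
  rw [hg]
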